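-- pv_equiv track=rewrite | github.com/IsaacG/Advent-of-Code | advent_of_code/2020/d06.py | solve
-- ===== SOURCE A (Python) =====
-- def solve(data, part: int) -> int:
--     """Count responses."""
--     if part == 1:
--         # Part 1: count the unique chars, joining all lines.
--         return sum(len(set(line.replace('\n', ''))) for line in data)
--
--     # Part 2: count num of chars found on all lines.
--     total = 0
--     for r in data:
--         records = r.split()
--         s = set(records.pop())
--         while records:
--             s &= set(records.pop())
--         total += len(s)
--     return total
-- ===== SOURCE B (Python) =====
-- def solve(data, part: int) -> int:
--     """Count responses."""
--     if part == 1: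
--         # Part 1: distinct answers per group, newline excluded.
--         return sum(len(set(line) - {'\n'}) for line in data)
--     # Part 2: chars of the first line that appear on every other line.
--     total = 0
--     for r in data:
--         first, *rest = r.split()
--         total += sum(1 for ch in set(first) if all(ch in line for line in rest))
--     return total
-- ===== Notes on version B (the rewrite author's own statement) =====
-- stated objective: idiomatic
-- what changed: Part 2 replaces the destructive pop-and-intersect loop over a mutated records list with a count of the first line's distinct chars that occur in every remaining line (set comprehension + all), and part 1 computes set(line) - {'\n'} instead of deduplicating line.replace('\n','').
import Mathlib
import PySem

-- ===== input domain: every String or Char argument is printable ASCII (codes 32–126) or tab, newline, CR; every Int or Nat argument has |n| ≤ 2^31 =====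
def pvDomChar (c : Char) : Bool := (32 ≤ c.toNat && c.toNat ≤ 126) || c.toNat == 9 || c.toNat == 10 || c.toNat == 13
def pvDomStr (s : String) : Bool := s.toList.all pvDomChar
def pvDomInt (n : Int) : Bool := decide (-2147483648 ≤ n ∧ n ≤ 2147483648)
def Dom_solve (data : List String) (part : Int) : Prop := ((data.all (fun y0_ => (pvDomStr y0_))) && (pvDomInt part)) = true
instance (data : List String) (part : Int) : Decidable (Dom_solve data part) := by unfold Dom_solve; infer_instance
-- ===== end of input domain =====

-- B: part 2 counts the first line's distinct chars present in every other line instead of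
-- A's pop-and-intersect loop; part 1 uses set(line) - {'\n'}. Objective: idiomatic, same cost.


-- ===== PORT A =====
-- 's = set(records.pop()); while records: s &= set(records.pop())' (the while part)
def solveAWhile (s : PySem.Set Char) (records : List String) : PySem.Set Char :=
  match h : PySem.List.pop? records with
  | none => s
  | some (last, rest) => solveAWhile (PySem.Set.inter s (PySem.Set.ofList last.toList)) rest
termination_by records.length
decreasing_by
  have h2 : rest.length + 1 = records.length := PySem.List.length_of_pop?_eq_some _ h
  omega

def solve (data : List String) (part : Int) : Int :=
  if part == 1 then
    (data.map (fun line =>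
      ((PySem.Set.ofList (PySem.Str.replace line "\n" "").toList).length : Int))).sum
  else
    data.foldl (fun total r =>
      let records := PySem.Str.split₀ r
      match PySem.List.pop? records with
      | none => total  -- Python raises IndexError here (empty group); excluded by Pre_solve
      | some (last, rest) =>
          total + ((solveAWhile (PySem.Set.ofList last.toList) rest).length : Int)) 0

-- ===== PORT B =====
def solve_alt (data : List String) (part : Int) : Int :=
  if part == 1 then
    (data.map (fun line =>
      ((PySem.Set.diff (PySem.Set.ofList line.toList) ['\n']).length : Int))).sum
  else
    data.foldl (fun total r =>
      match PySem.Str.split₀ r with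
      | [] => total  -- Python raises ValueError here (empty group); excluded by Pre_solve
      | first :: rest =>
          total + (((PySem.Set.ofList first.toList).countP
            (fun ch => rest.all (fun line => line.toList.contains ch))) : Int)) 0

-- ===== PRECONDITION & SPEC =====
-- Pre_ excludes, for part ≠ 1, data containing an empty/whitespace-only group, where both A and B raise.
def Pre_solve (data : List String) (part : Int) : Prop :=
  part = 1 ∨ ∀ r ∈ data, PySem.Str.split₀ r ≠ []
instance (data : List String) (part : Int) : Decidable (Pre_solve data part) := by
  unfold Pre_solve; infer_instance
def pvWitness_solve : List String × Int := (["ab\nb", "a b"], 2)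

def Spec_solve (data : List String) (part : Int) (out : Int) : Prop := out = solve_alt data part
instance (data : List String) (part : Int) (out : Int) : Decidable (Spec_solve data part out) := by
  unfold Spec_solve; infer_instance

-- ===== CLAIM (what is proved, stated in full; the proofs are below) =====
def Claim_equal_solve : Prop := ∀ (data : List String) (part : Int),
  Dom_solve data part → Pre_solve data part → Spec_solve data part (solve data part)

-- ===== LEMMAS AND PROOFS =====

lemma solveAWhile_nil (s : PySem.Set Char) : solveAWhile s [] = s := by
  rw [solveAWhile.eq_def]
  split
  · rfl
  · next last rest h => simp [PySem.List.pop?, PySem.List.pyIdx?] at h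

lemma solveAWhile_concat (s : PySem.Set Char) (l : List String) (last : String) :
    solveAWhile s (l ++ [last]) =
      solveAWhile (PySem.Set.inter s (PySem.Set.ofList last.toList)) l := by
  rw [solveAWhile.eq_def]
  split
  · next h => rw [PySem.List.pop?_last] at h; exact absurd h (by simp)
  · next last' rest' h =>
      rw [PySem.List.pop?_last] at h
      simp only [Option.some.injEq, Prod.mk.injEq] at h
      obtain ⟨rfl, rfl⟩ := h
      rfl

-- A's while loop computes the intersection with every record
lemma solveAWhile_mem (records : List String) :
    ∀ (s : PySem.Set Char) (x : Char),
      x ∈ solveAWhile s records ↔ x ∈ s ∧ ∀ r ∈ records, x ∈ r.toList := by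
  induction records using List.reverseRecOn with
  | nil => intro s x; rw [solveAWhile_nil]; simp
  | append_singleton l last ih =>
      intro s x
      rw [solveAWhile_concat, ih]
      simp only [PySem.Set.mem_inter, PySem.Set.mem_ofList, List.mem_append,
        List.mem_singleton]
      constructor
      · rintro ⟨⟨hs, hl⟩, hall⟩
        refine ⟨hs, fun r hr => ?_⟩
        rcases hr with hr | rfl
        · exact hall r hr
        · exact hl
      · rintro ⟨hs, hall⟩
        exact ⟨⟨hs, hall last (Or.inr rfl)⟩, fun r hr => hall r (Or.inl hr)⟩

lemma solveAWhile_nodup (records : List String) :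
    ∀ (s : PySem.Set Char), s.Nodup → (solveAWhile s records).Nodup := by
  induction records using List.reverseRecOn with
  | nil => intro s hs; rwa [solveAWhile_nil]
  | append_singleton l last ih =>
      intro s hs
      rw [solveAWhile_concat]
      exact ih _ (PySem.Set.nodup_inter _ _ hs)

-- replace(line, '\n', '') deletes the newlines: a filter
lemma replace_go_single (nl : Char) :
    ∀ (l : List Char) (fuel : Nat) (acc : List Char), l.length ≤ fuel →
      PySem.Chars.replace.go [nl] [] fuel l acc =
        acc.reverse ++ l.filter (fun c => !(c == nl)) := by
  intro l
  induction l with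
  | nil =>
      intro fuel acc _
      cases fuel <;> simp [PySem.Chars.replace.go]
  | cons c t ih =>
      intro fuel acc hle
      cases fuel with
      | zero => simp at hle
      | succ fuel =>
        rw [PySem.Chars.replace.go]
        by_cases hc : c = nl
        · subst hc
          rw [if_pos (by simp [List.isPrefixOf])]
          simp only [List.length_cons, List.length_nil, List.drop_succ_cons, List.drop_zero,
            List.reverse_nil, List.nil_append]
          rw [ih fuel acc (by simpa using Nat.le_of_succ_le_succ (by simpa using hle))]
          simp
        · rw [if_neg (by simp [List.isPrefixOf]; exact fun h => hc h.symm)]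
          rw [ih fuel (c :: acc) (by simpa using Nat.le_of_succ_le_succ (by simpa using hle))]
          simp only [List.filter_cons, List.reverse_cons, List.append_assoc,
            List.singleton_append]
          rw [if_pos (by simpa using fun h => hc h)]

lemma replace_newline (l : List Char) :
    PySem.Chars.replace l ['\n'] [] = l.filter (fun c => !(c == '\n')) := by
  rw [PySem.Chars.replace]
  rw [if_neg (by simp)]
  exact replace_go_single '\n' l l.length [] le_rfl

-- part 1, per line: |set(line.replace('\n',''))| = |set(line) - {'\n'}|
lemma part1_line (line : String) :
    ((PySem.Set.ofList (PySem.Str.replace line "\n" "").toList).length : Int) =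
      ((PySem.Set.diff (PySem.Set.ofList line.toList) ['\n']).length : Int) := by
  have hperm : (PySem.Set.ofList (PySem.Str.replace line "\n" "").toList).Perm
      (PySem.Set.diff (PySem.Set.ofList line.toList) ['\n']) := by
    rw [List.perm_ext_iff_of_nodup (PySem.Set.nodup_ofList _)
      (PySem.Set.nodup_diff _ _ (PySem.Set.nodup_ofList _))]
    intro a
    rw [PySem.Str.toList_replace]
    have h1 : ("\n" : String).toList = ['\n'] := rfl
    have h2 : ("" : String).toList = ([] : List Char) := rfl
    rw [h1, h2, replace_newline]
    simp only [PySem.Set.mem_ofList, PySem.Set.mem_diff, List.mem_filter,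
      List.mem_singleton, Bool.not_eq_eq_eq_not, Bool.not_true, beq_eq_false_iff_ne,
      ne_eq]
  exact_mod_cast hperm.length_eq

-- per non-empty group, A's loop body equals B's loop body
lemma part2_body (total : Int) (first : String) (rest : List String) :
    (match PySem.List.pop? (first :: rest) with
      | none => total
      | some (last, l) =>
          total + ((solveAWhile (PySem.Set.ofList last.toList) l).length : Int)) =
    total + (((PySem.Set.ofList first.toList).countP
        (fun ch => rest.all (fun line => line.toList.contains ch))) : Int) := by
  obtain ⟨l, last, hco⟩ :=
    (List.eq_nil_or_concat (first :: rest)).resolve_left (by simp)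
  rw [List.concat_eq_append] at hco
  rw [hco, PySem.List.pop?_last]
  dsimp only
  have hperm : (solveAWhile (PySem.Set.ofList last.toList) l).Perm
      ((PySem.Set.ofList first.toList).filter
        (fun ch => rest.all (fun line => line.toList.contains ch))) := by
    rw [List.perm_ext_iff_of_nodup
      (solveAWhile_nodup l _ (PySem.Set.nodup_ofList _))
      (List.Nodup.filter _ (PySem.Set.nodup_ofList _))]
    intro a
    rw [solveAWhile_mem]
    simp only [List.mem_filter, PySem.Set.mem_ofList, List.all_eq_true,
      List.contains_eq_mem, decide_eq_true_eq]
    constructor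
    · rintro ⟨hlast, hl⟩
      have hall : ∀ r ∈ first :: rest, a ∈ r.toList := by
        rw [hco]
        intro r hr
        rcases List.mem_append.1 hr with hr | hr
        · exact hl r hr
        · rw [List.mem_singleton] at hr; subst hr; exact hlast
      exact ⟨hall first (List.mem_cons_self ..), fun line hline => hall line (List.mem_cons_of_mem _ hline)⟩
    · rintro ⟨hfirst, hrest⟩
      have hall : ∀ r ∈ l ++ [last], a ∈ r.toList := by
        rw [← hco]
        intro r hr
        rcases List.mem_cons.1 hr with rfl | hr
        · exact hfirst
        · exact hrest r hr
      exact ⟨hall last (by simp), fun r hr => hall r (by simp [hr])⟩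
  rw [List.countP_eq_length_filter, ← hperm.length_eq]

-- ===== VERDICT (by name: the statement is the Claim_ definition above) =====
theorem solve_spec : Claim_equal_solve := by
  intro data part _hdom hpre
  unfold Spec_solve solve solve_alt
  by_cases hp : part == 1
  · rw [if_pos hp, if_pos hp]
    congr 1
    exact List.map_congr_left (fun line _ => part1_line line)
  · rw [if_neg hp, if_neg hp]
    have hne : ∀ r ∈ data, PySem.Str.split₀ r ≠ [] := by
      rcases hpre with h1 | h
      · exact absurd (by simpa using h1) (by simpa using hp)
      · exact h
    refine PySem.List.foldl_congr_mem _ _ _ _ (fun total r hr => ?_)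
    rcases hsp : PySem.Str.split₀ r with _ | ⟨first, rest⟩
    · exact absurd hsp (hne r hr)
    · exact part2_body total first rest
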